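-- pv_equiv track=rewrite | github.com/MatisseAD/lazaristes | chapitre5.py | factorion
-- ===== SOURCE A (Python) =====
-- def factorielle(x):
--     cpt=1
--     for k in range(1,x+1):
--         cpt=cpt*k
--     return cpt
--
-- def b_to_nombre(n,b):
--     nombre_b=str(n)
--     nombre=0
--     i=0
--
--
--     for k in nombre_b:
--         nombre = nombre + int(k) * (b ** (len(nombre_b)-1-i))
--         i=i+1
--
--     return [int(k) for k in str(nombre)]
--
-- def factorion(m,b):
--     nb = b_to_nombre(m,b)
--     somme_facto=0
--     nombre=""
--
--     for k in nb:
--         nombre = nombre + str(k)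
--
--     for k in nombre:
--         somme_facto = somme_facto + factorielle(int(k))
--
--     return somme_facto == int(nombre)
-- ===== SOURCE B (Python) =====
-- def _fact(k):
--     return 1 if k < 2 else k * _fact(k - 1)
--
--
-- def _conv(m, b):
--     if m == 0:
--         return 0
--     return _conv(m // 10, b) * b + m % 10
--
--
-- def _dfs(n):
--     return _fact(n) if n < 10 else _dfs(n // 10) + _fact(n % 10)
--
--
-- def factorion(m, b):
--     n = _conv(m, b)
--     return _dfs(n) == n
-- ===== Notes on version B (the rewrite author's own statement) =====
-- stated objective: alternative
-- what changed: B never touches strings or lists: it extracts digits arithmetically by divmod-10 recursion (least-significant first), whereas A converts through decimal strings four times (str(m) with per-position powers and an index counter, a digit list, a string rebuild, int(nombre)) and runs a counting loop for each factorial.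
-- outside the precondition, e.g. on factorion(13, -2): A returns True, B returns True; on factorion(12, -2): A returns False, B returns False
import Mathlib
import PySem

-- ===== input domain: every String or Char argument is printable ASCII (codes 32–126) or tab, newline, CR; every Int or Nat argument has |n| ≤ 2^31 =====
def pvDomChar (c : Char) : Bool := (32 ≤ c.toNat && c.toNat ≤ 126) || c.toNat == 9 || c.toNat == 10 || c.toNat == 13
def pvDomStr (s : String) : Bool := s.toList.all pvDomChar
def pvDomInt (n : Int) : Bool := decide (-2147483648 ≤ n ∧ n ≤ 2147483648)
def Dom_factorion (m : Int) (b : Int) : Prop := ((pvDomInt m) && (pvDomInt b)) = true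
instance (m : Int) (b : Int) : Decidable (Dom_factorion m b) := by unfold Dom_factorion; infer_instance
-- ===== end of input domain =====

-- B replaces A's four string passes (str(m) with per-position powers and an index
-- counter, a digit list, a string rebuild, per-digit factorial counting loops) by two
-- arithmetic divmod-10 recursions over the digits, with no strings or lists at all:
-- objective 'alternative'. Return-value equivalence on Pre_ (m ≥ 0 and (b ≥ 0 or m < 10)).

-- ===== PORT A =====
def factorielle (x : Int) : Int :=
  (PySem.List.pyRange 1 (x + 1) 1).foldl (fun cpt k => cpt * k) 1

-- the exponent len(nombre_b)-1-i is ≥ 0 on every loop iteration (i < len), so the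
-- Nat subtraction and Nat exponent below compute exactly Python's b ** (len-1-i)
def b_to_nombre (n : Int) (b : Int) : List Int :=
  let nombre_b := PySem.Int.toChars n
  let nombre := (nombre_b.foldl
    (fun (st : Int × Nat) k =>
      (st.1 + ((PySem.Int.ofChars? [k]).getD 0) * b ^ (nombre_b.length - 1 - st.2), st.2 + 1))
    ((0 : Int), (0 : Nat))).1
  (PySem.Int.toChars nombre).map (fun k => (PySem.Int.ofChars? [k]).getD 0)

def factorion (m : Int) (b : Int) : Bool :=
  let nb := b_to_nombre m b
  let nombre : List Char := nb.foldl (fun s k => s ++ PySem.Int.toChars k) []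
  let somme_facto : Int :=
    nombre.foldl (fun s k => s + factorielle ((PySem.Int.ofChars? [k]).getD 0)) 0
  decide (somme_facto = (PySem.Int.ofChars? nombre).getD 0)

-- ===== PORT B =====
-- _fact(k): 1 if k < 2 else k * _fact(k - 1)
def bfact (k : Int) : Int :=
  if k < 2 then 1 else k * bfact (k - 1)
termination_by k.toNat
decreasing_by omega

-- _conv(m, b): 0 if m == 0 else _conv(m // 10, b) * b + m % 10.
-- Python recurses forever on m < 0 (outside Pre_); the `m ≤ 0` guard makes the Lean
-- recursion well-founded and is exact on m ≥ 0, the only admitted inputs.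
def bconv (m : Int) (b : Int) : Int :=
  if m ≤ 0 then 0
  else bconv (PySem.Int.floordiv m 10) b * b + PySem.Int.mod m 10
termination_by m.toNat
decreasing_by
  rename_i h
  rw [PySem.Int.floordiv_eq_ediv_of_pos (by omega)]
  omega

-- _dfs(n): _fact(n) if n < 10 else _dfs(n // 10) + _fact(n % 10)
def bdfs (n : Int) : Int :=
  if n < 10 then bfact n else bdfs (PySem.Int.floordiv n 10) + bfact (PySem.Int.mod n 10)
termination_by n.toNat
decreasing_by
  rename_i h
  rw [PySem.Int.floordiv_eq_ediv_of_pos (by omega)]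
  omega

def factorion_alt (m : Int) (b : Int) : Bool :=
  let n := bconv m b
  decide (bdfs n = n)

-- ===== PRECONDITION & SPEC =====
-- Pre_ excludes negative m, where int() of the '-' digit raises ValueError (and B's
-- recursion does not terminate), and negative b combined with a multi-digit m, where
-- A raises ValueError whenever the alternating power sum is negative and returns a
-- value only on scattered inputs (B agrees with A on those too).
def Pre_factorion (m : Int) (b : Int) : Prop := 0 ≤ m ∧ (0 ≤ b ∨ m < 10)
instance (m : Int) (b : Int) : Decidable (Pre_factorion m b) := by unfold Pre_factorion; infer_instance
def pvWitness_factorion : Int × Int := (145, 10)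

def Spec_factorion (m : Int) (b : Int) (out : Bool) : Prop := out = factorion_alt m b
instance (m : Int) (b : Int) (out : Bool) : Decidable (Spec_factorion m b out) := by unfold Spec_factorion; infer_instance

-- ===== CLAIM (what is proved, stated in full; the proofs are below) =====
def Claim_equal_factorion : Prop := ∀ (m : Int) (b : Int), Dom_factorion m b → Pre_factorion m b → Spec_factorion m b (factorion m b)

-- ===== LEMMAS AND PROOFS =====

-- value of one decimal digit, as the Python int() of the corresponding char computes it
def vstep (a : Nat) (c : Char) : Nat := a * 10 + (c.toNat - '0'.toNat)

-- int(s) on a nonempty string of digit characters returns its base-10 value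
theorem parse_digits (ds : List Char) (hne : ds ≠ []) (hdig : ∀ c ∈ ds, c.isDigit) :
    PySem.Int.ofChars? ds = some ((ds.foldl vstep 0 : Nat) : Int) := by
  have hsp : ∀ x : Char, x.isDigit → PySem.Int.isIntSpace x = false := by
    intro x hx
    simp [Char.isDigit] at hx
    simp only [PySem.Int.isIntSpace, Bool.or_eq_false_iff, decide_eq_false_iff_not]
    repeat' apply And.intro
    all_goals (intro h; subst h; revert hx; decide)
  have hkeep : ∀ (l : List Char), (∀ x ∈ l, x.isDigit) → List.dropWhile PySem.Int.isIntSpace l = l := by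
    intro l hl
    rw [List.dropWhile_eq_self_iff]
    intro h0
    simp [hsp _ (hl _ (List.getElem_mem h0))]
  obtain ⟨c, t, rfl⟩ : ∃ c t, ds = c :: t := by
    cases ds with
    | nil => exact absurd rfl hne
    | cons c t => exact ⟨c, t, rfl⟩
  have h1 : List.dropWhile PySem.Int.isIntSpace (c :: t) = c :: t := hkeep _ hdig
  have h2 : List.dropWhile PySem.Int.isIntSpace (c :: t).reverse = (c :: t).reverse := by
    refine hkeep _ ?_
    intro x hx
    exact hdig x (by rwa [List.mem_reverse] at hx)
  simp only [PySem.Int.ofChars?, h1, h2, List.reverse_reverse]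
  split
  · rename_i ds' heq
    injection heq with hh _
    exact absurd (hh ▸ hdig c (by simp)) (by decide)
  · rename_i ds' heq
    injection heq with hh _
    exact absurd (hh ▸ hdig c (by simp)) (by decide)
  · rename_i heq1 heq2
    refine Eq.trans (congrArg (fun o => Option.map (fun n => n) (o >>= fun a => pure ((a : Nat) : Int))) (?_ : _ = some (List.foldl vstep 0 (c :: t)))) rfl
    conv_lhs => whnf
    have hc : c.isDigit = true := hdig c (by simp)
    have hds : ∀ x ∈ t, x.isDigit := fun x hx => hdig x (List.mem_cons_of_mem _ hx)
    cases hI : instDecidableEqBool c.isDigit true with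
    | isFalse hf => exact absurd hc hf
    | isTrue hT =>
      conv_lhs => whnf
      rw [List.foldl_cons, show 0 * 10 + (c.toNat - '0'.toNat) = vstep 0 c from rfl]
      generalize vstep 0 c = a
      clear hc hT hI h1 h2 hne hdig heq1 heq2 c
      induction t generalizing a with
      | nil => rfl
      | cons d t' ih =>
        have hd : d.isDigit = true := hds d (by simp)
        have hds' : ∀ x ∈ t', x.isDigit := fun x hx => hds x (List.mem_cons_of_mem _ hx)
        conv_lhs => whnf
        cases hI : instDecidableEqBool d.isDigit true with
        | isFalse hf => exact absurd hd hf
        | isTrue hT =>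
          conv_lhs => whnf
          rw [List.foldl_cons, show a * 10 + (d.toNat - '0'.toNat) = vstep a d from rfl]
          exact ih hds' _

theorem toDigitsCore_append (f : Nat) : ∀ (n : Nat) (l : List Char),
    Nat.toDigitsCore 10 f n l = Nat.toDigitsCore 10 f n [] ++ l := by
  induction f with
  | zero => intro n l; simp [Nat.toDigitsCore]
  | succ f ih =>
    intro n l
    simp only [Nat.toDigitsCore]
    by_cases h : n / 10 = 0
    · simp [h]
    · simp only [h, if_false]
      rw [ih (n / 10) ((n % 10).digitChar :: l), ih (n / 10) [(n % 10).digitChar]]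
      simp

theorem toDigitsCore_fuel (n : Nat) : ∀ (f₁ f₂ : Nat), n < f₁ → n < f₂ →
    Nat.toDigitsCore 10 f₁ n [] = Nat.toDigitsCore 10 f₂ n [] := by
  induction n using Nat.strong_induction_on with
  | _ n IH =>
    intro f₁ f₂ h1 h2
    obtain ⟨g₁, rfl⟩ : ∃ g, f₁ = g + 1 := ⟨f₁ - 1, by omega⟩
    obtain ⟨g₂, rfl⟩ : ∃ g, f₂ = g + 1 := ⟨f₂ - 1, by omega⟩
    simp only [Nat.toDigitsCore]
    by_cases h : n / 10 = 0
    · simp [h]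
    · simp only [h, if_false]
      rw [toDigitsCore_append g₁, toDigitsCore_append g₂]
      have hlt : n / 10 < n := Nat.div_lt_self (by omega) (by omega)
      rw [IH (n / 10) hlt g₁ g₂ (by omega) (by omega)]

theorem toDigits_lt (n : Nat) (h : n < 10) : Nat.toDigits 10 n = [Nat.digitChar n] := by
  simp [Nat.toDigits, Nat.toDigitsCore, Nat.div_eq_of_lt h, Nat.mod_eq_of_lt h]

theorem toDigits_ge (n : Nat) (h : 10 ≤ n) :
    Nat.toDigits 10 n = Nat.toDigits 10 (n / 10) ++ [Nat.digitChar (n % 10)] := by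
  have h10 : n / 10 ≠ 0 := by
    intro hc; have := Nat.div_add_mod n 10; omega
  show Nat.toDigitsCore 10 (n + 1) n [] = _
  simp only [Nat.toDigitsCore, h10, if_false]
  rw [toDigitsCore_append n]
  have hlt : n / 10 < n := Nat.div_lt_self (by omega) (by omega)
  rw [toDigitsCore_fuel (n / 10) n (n / 10 + 1) (by omega) (by omega)]
  rfl

theorem digitChar_isDigit (d : Nat) (h : d < 10) : (Nat.digitChar d).isDigit = true := by
  interval_cases d <;> decide

theorem vstep_digitChar (a d : Nat) (h : d < 10) : vstep a (Nat.digitChar d) = a * 10 + d := by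
  interval_cases d <;> rfl

theorem toDigits_all_digits (n : Nat) : ∀ c ∈ Nat.toDigits 10 n, c.isDigit := by
  induction n using Nat.strong_induction_on with
  | _ n IH =>
    by_cases h : n < 10
    · rw [toDigits_lt n h]
      intro c hc
      simp at hc
      subst hc
      exact digitChar_isDigit n h
    · rw [toDigits_ge n (by omega)]
      intro c hc
      rcases List.mem_append.mp hc with hc | hc
      · exact IH (n / 10) (Nat.div_lt_self (by omega) (by omega)) c hc
      · simp at hc; subst hc
        exact digitChar_isDigit _ (Nat.mod_lt _ (by omega))

theorem toDigits_ne_nil (n : Nat) : Nat.toDigits 10 n ≠ [] := by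
  by_cases h : n < 10
  · rw [toDigits_lt n h]; simp
  · rw [toDigits_ge n (by omega)]; simp

theorem toDigits_val (n : Nat) : (Nat.toDigits 10 n).foldl vstep 0 = n := by
  induction n using Nat.strong_induction_on with
  | _ n IH =>
    by_cases h : n < 10
    · rw [toDigits_lt n h]
      simp [vstep_digitChar 0 n h]
    · rw [toDigits_ge n (by omega), List.foldl_append]
      rw [IH (n / 10) (Nat.div_lt_self (by omega) (by omega))]
      simp only [List.foldl_cons, List.foldl_nil]
      rw [vstep_digitChar _ _ (Nat.mod_lt _ (by omega))]
      omega

theorem toChars_nonneg (n : Int) (h : 0 ≤ n) :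
    PySem.Int.toChars n = Nat.toDigits 10 n.toNat := by
  simp [PySem.Int.toChars, not_lt.mpr h]

theorem roundtrip (n : Int) (h : 0 ≤ n) :
    PySem.Int.ofChars? (PySem.Int.toChars n) = some n := by
  rw [toChars_nonneg n h,
    parse_digits _ (toDigits_ne_nil _) (toDigits_all_digits _), toDigits_val]
  simp [Int.toNat_of_nonneg h]

theorem chars_nonneg (n : Int) (h : 0 ≤ n) : ∀ c ∈ PySem.Int.toChars n, c.isDigit := by
  rw [toChars_nonneg n h]; exact toDigits_all_digits _

-- the Int value of a digit char
def dval (c : Char) : Int := ((c.toNat - 48 : Nat) : Int)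

theorem parse_single (c : Char) (h : c.isDigit) :
    (PySem.Int.ofChars? [c]).getD 0 = dval c := by
  rw [parse_digits [c] (by simp) (by simpa using h)]
  simp [vstep, dval]

theorem dval_nonneg (c : Char) : 0 ≤ dval c := Int.natCast_nonneg _

theorem isDigit_toNat (c : Char) (h : c.isDigit) : 48 ≤ c.toNat ∧ c.toNat ≤ 57 := by
  simp only [Char.isDigit, Bool.and_eq_true, decide_eq_true_eq] at h
  obtain ⟨h1, h2⟩ := h
  rw [GE.ge, UInt32.le_iff_toNat_le] at h1
  rw [UInt32.le_iff_toNat_le] at h2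
  exact ⟨h1, h2⟩

theorem char_eq_of_toNat (c d : Char) (h : c.toNat = d.toNat) : c = d := by
  apply Char.ext
  exact UInt32.toNat_inj.mp h

theorem digitChar_dval (c : Char) (h : c.isDigit) : Nat.digitChar (c.toNat - 48) = c := by
  have hb := isDigit_toNat c h
  apply char_eq_of_toNat
  have h10 : c.toNat - 48 < 10 := by omega
  have : (Nat.digitChar (c.toNat - 48)).toNat = (c.toNat - 48) + 48 := by
    generalize hk : c.toNat - 48 = k at h10 ⊢
    interval_cases k <;> rfl
  omega

theorem toChars_dval (c : Char) (h : c.isDigit) :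
    PySem.Int.toChars (dval c) = [c] := by
  rw [toChars_nonneg _ (by simp [dval]), dval, Int.toNat_natCast]
  rw [toDigits_lt _ (by have := isDigit_toNat c h; omega), digitChar_dval c h]

-- positional value Σ dᵢ · b^(len-1-i), written as structural recursion
def psum (b : Int) : List Int → Int
  | [] => 0
  | d :: t => d * b ^ t.length + psum b t

theorem psum_nonneg (b : Int) (hb : 0 ≤ b) (ds : List Int) (h : ∀ d ∈ ds, 0 ≤ d) :
    0 ≤ psum b ds := by
  induction ds with
  | nil => simp [psum]
  | cons d t ih =>
    have := h d (by simp)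
    have ht := ih (fun x hx => h x (List.mem_cons_of_mem _ hx))
    have : 0 ≤ d * b ^ t.length := mul_nonneg this (pow_nonneg hb _)
    simp only [psum]; omega

-- A's indexed power-sum loop computes psum of the digit values
theorem afold_chars (b : Int) (L : Nat) : ∀ (t : List Char) (s : Int) (i : Nat),
    (∀ c ∈ t, c.isDigit) → i + t.length = L →
    (t.foldl (fun (st : Int × Nat) k =>
        (st.1 + ((PySem.Int.ofChars? [k]).getD 0) * b ^ (L - 1 - st.2), st.2 + 1)) (s, i)).1
      = s + psum b (t.map dval) := by
  intro t
  induction t with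
  | nil => intro s i _ _; simp [psum]
  | cons c t ih =>
    intro s i hdig hL
    have hc := parse_single c (hdig c (by simp))
    have hexp : L - 1 - i = t.length := by simp at hL; omega
    simp only [List.foldl_cons, hc, hexp]
    rw [ih _ (i + 1) (fun x hx => hdig x (List.mem_cons_of_mem _ hx)) (by simp at hL ⊢; omega)]
    simp [psum]; ring

-- appending a digit multiplies the positional value by b and adds the digit
theorem psum_append (b : Int) (ds : List Int) (d : Int) :
    psum b (ds ++ [d]) = psum b ds * b + d := by
  induction ds with
  | nil => simp [psum]
  | cons x t ih =>
    simp only [List.cons_append, psum, ih, List.length_append, List.length_cons,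
      List.length_nil]
    ring

-- A's string rebuild restores exactly the original digit string
theorem rebuild_chars : ∀ (t : List Char) (a : List Char), (∀ c ∈ t, c.isDigit) →
    ((t.map (fun k => (PySem.Int.ofChars? [k]).getD 0)).foldl
        (fun s k => s ++ PySem.Int.toChars k) a) = a ++ t := by
  intro t
  induction t with
  | nil => intro a _; simp
  | cons c t ih =>
    intro a hdig
    have hc := parse_single c (hdig c (by simp))
    simp only [List.map_cons, List.foldl_cons, hc, toChars_dval c (hdig c (by simp))]
    rw [ih _ (fun x hx => hdig x (List.mem_cons_of_mem _ hx))]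
    simp

-- B's recursive factorial agrees with A's counting-loop factorial on the digit range
theorem bfact_eq_factorielle (k : Int) (h0 : 0 ≤ k) (h9 : k < 10) :
    bfact k = factorielle k := by
  interval_cases k <;> (repeat (rw [bfact]; norm_num)) <;> decide

-- A's factorial-sum loop is the sum of factorielle over the digit values
theorem sum_chars : ∀ (t : List Char) (s : Int), (∀ c ∈ t, c.isDigit) →
    t.foldl (fun s k => s + factorielle ((PySem.Int.ofChars? [k]).getD 0)) s
      = s + (t.map (fun c => factorielle (dval c))).sum := by
  intro t
  induction t with
  | nil => intro s _; simp
  | cons c t ih =>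
    intro s hdig
    have hc := hdig c (by simp)
    simp only [List.foldl_cons, List.map_cons, List.sum_cons]
    rw [ih _ (fun x hx => hdig x (List.mem_cons_of_mem _ hx))]
    rw [parse_single c hc]
    ring

theorem dval_digitChar (k : Nat) (h : k < 10) : dval (Nat.digitChar k) = (k : Int) := by
  interval_cases k <;> rfl

-- B's divmod conversion recursion computes A's positional power sum
theorem bconv_eq_psum (b : Int) (m : Int) (hm : 0 ≤ m) :
    bconv m b = psum b ((PySem.Int.toChars m).map dval) := by
  induction hK : m.toNat using Nat.strong_induction_on generalizing m with
  | _ K IH =>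
  subst hK
  by_cases h0 : m = 0
  · subst h0
    rw [bconv, toChars_nonneg 0 le_rfl]
    simp [toDigits_lt 0 (by omega), psum, dval_digitChar 0 (by omega)]
  · have hpos : 0 < m := by omega
    rw [bconv, if_neg (by omega),
      PySem.Int.floordiv_eq_ediv_of_pos (a := m) (by omega),
      PySem.Int.mod_eq_emod_of_pos (a := m) (by omega)]
    rw [toChars_nonneg m hm]
    by_cases h10 : m < 10
    · have hd : m.toNat < 10 := by omega
      rw [toDigits_lt _ hd]
      have hq : m / 10 = 0 := by omega
      rw [hq, bconv, if_pos le_rfl]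
      simp [psum, dval_digitChar _ hd]
      omega
    · have hd : 10 ≤ m.toNat := by omega
      rw [toDigits_ge _ hd]
      simp only [List.map_append, List.map_cons, List.map_nil]
      rw [dval_digitChar _ (Nat.mod_lt _ (by omega)), psum_append]
      have hq : (m / 10).toNat = m.toNat / 10 := by omega
      have hqlt : (m / 10).toNat < m.toNat := by omega
      rw [IH (m / 10).toNat hqlt (m / 10) (by omega) rfl,
        toChars_nonneg (m / 10) (by omega), hq]
      have hmod : ((m.toNat % 10 : Nat) : Int) = m % 10 := by omega
      rw [hmod]

-- B's divmod digit-factorial recursion computes A's per-digit factorial sum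
theorem bdfs_eq_sum (n : Int) (hn : 0 ≤ n) :
    bdfs n = ((PySem.Int.toChars n).map (fun c => factorielle (dval c))).sum := by
  induction hK : n.toNat using Nat.strong_induction_on generalizing n with
  | _ K IH =>
  subst hK
  rw [toChars_nonneg n hn]
  by_cases h10 : n < 10
  · rw [bdfs, if_pos h10, toDigits_lt _ (by omega)]
    simp only [List.map_cons, List.map_nil, List.sum_cons, List.sum_nil, add_zero]
    rw [dval_digitChar _ (by omega), Int.toNat_of_nonneg hn]
    exact bfact_eq_factorielle n hn h10
  · rw [bdfs, if_neg h10,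
      PySem.Int.floordiv_eq_ediv_of_pos (a := n) (by omega),
      PySem.Int.mod_eq_emod_of_pos (a := n) (by omega),
      toDigits_ge _ (by omega), List.map_append, List.sum_append]
    have hq : (n / 10).toNat = n.toNat / 10 := by omega
    have hqlt : (n / 10).toNat < n.toNat := by omega
    rw [IH (n / 10).toNat hqlt (n / 10) (by omega) rfl,
      toChars_nonneg (n / 10) (by omega), hq]
    simp only [List.map_cons, List.map_nil, List.sum_cons, List.sum_nil, add_zero]
    rw [dval_digitChar _ (Nat.mod_lt _ (by omega)),
      bfact_eq_factorielle _ (Int.emod_nonneg n (by omega)) (Int.emod_lt_of_pos n (by omega))]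
    have hmod : ((n.toNat % 10 : Nat) : Int) = n % 10 := by omega
    rw [hmod]

-- ===== VERDICT (by name: the statement is the Claim_ definition above) =====
theorem factorion_spec : Claim_equal_factorion := by
  intro m b _ hpre
  obtain ⟨hm, hb⟩ := hpre
  unfold Spec_factorion factorion factorion_alt b_to_nombre
  dsimp only []
  have hcs : ∀ c ∈ PySem.Int.toChars m, c.isDigit := chars_nonneg m hm
  rw [afold_chars b (PySem.Int.toChars m).length _ 0 0 hcs (by simp),
    bconv_eq_psum b m hm]
  simp only [zero_add]
  set N : Int := psum b ((PySem.Int.toChars m).map dval) with hN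
  have hN0 : 0 ≤ N := by
    rcases hb with hb | hm10
    · exact psum_nonneg b hb _ (by
        intro d hd
        simp only [List.mem_map] at hd
        obtain ⟨c, _, rfl⟩ := hd
        exact dval_nonneg c)
    · have h10 : m.toNat < 10 := by omega
      rw [hN, toChars_nonneg m hm, toDigits_lt _ h10]
      simp [psum, dval_digitChar _ h10]
  have hcs2 : ∀ c ∈ PySem.Int.toChars N, c.isDigit := chars_nonneg N hN0
  simp only [rebuild_chars _ [] hcs2, List.nil_append, sum_chars _ 0 hcs2,
    roundtrip N hN0, Option.getD_some, zero_add, bdfs_eq_sum N hN0]
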